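-- pv_equiv track=rewrite | github.com/GridflowX/infra-optimization | ex4.py | merge_skyline
-- ===== SOURCE A (Python) =====
-- def merge_skyline(skyline):
--     if not skyline:
--         return []
--     merged = [skyline[0]]
--     for seg in skyline[1:]:
--         last = merged[-1]
--         if last[1] == seg[1] and last[0] + last[2] == seg[0]:
--             merged[-1] = (last[0], last[1], last[2] + seg[2])
--         else:
--             merged.append(seg)
--     return merged
-- ===== SOURCE B (Python) =====
-- def merge_skyline(skyline):
--     # pass 1: assign a group id to each segment; a new id starts whenever a
--     # segment is not a contiguous same-height continuation of its predecessor
--     pairs = []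
--     gid = -1
--     prev = None
--     for seg in skyline:
--         if prev is None or seg[1] != prev[1] or seg[0] != prev[0] + prev[2]:
--             gid += 1
--         pairs.append((seg, gid))
--         prev = seg
--     # pass 2: collapse each group into one segment, summing the widths
--     out = []
--     for seg, g in pairs:
--         if len(out) == g:
--             out.append(seg)
--         else:
--             cur = out[g]
--             out[g] = (cur[0], cur[1], cur[2] + seg[2])
--     return out
-- ===== Notes on version B (the rewrite author's own statement) =====
-- stated objective: alternative
-- what changed: Replaces A's single pass that mutates the last element of the growing result with a two-pass group-id scheme: pass 1 labels each segment with a group id (incremented when the segment does not continue its predecessor), pass 2 collapses each group by accumulating widths at the group's index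
import Mathlib
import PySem

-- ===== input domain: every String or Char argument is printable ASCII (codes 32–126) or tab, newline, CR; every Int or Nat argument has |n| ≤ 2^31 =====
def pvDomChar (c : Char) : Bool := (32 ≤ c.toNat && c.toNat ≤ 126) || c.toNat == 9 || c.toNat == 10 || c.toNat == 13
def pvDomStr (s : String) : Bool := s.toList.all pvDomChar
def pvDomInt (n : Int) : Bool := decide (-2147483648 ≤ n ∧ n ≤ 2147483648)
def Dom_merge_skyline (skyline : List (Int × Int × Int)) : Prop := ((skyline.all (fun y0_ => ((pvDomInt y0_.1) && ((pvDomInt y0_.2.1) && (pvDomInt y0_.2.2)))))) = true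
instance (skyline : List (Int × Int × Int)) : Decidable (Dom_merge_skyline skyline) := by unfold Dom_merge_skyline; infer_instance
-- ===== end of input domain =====

-- B replaces A's last-element-mutating single pass with a two-pass group-id scheme (label then collapse); objective: alternative decomposition.


-- ===== PORT A =====
-- one fold step: compare seg with merged[-1], either extend merged[-1] in place or append seg
def mergeStepA (merged : List (Int × Int × Int)) (seg : Int × Int × Int) : List (Int × Int × Int) :=
  match merged.getLast? with
  | some last =>
      if last.2.1 = seg.2.1 ∧ last.1 + last.2.2 = seg.1 then
        merged.dropLast ++ [(last.1, last.2.1, last.2.2 + seg.2.2)]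
      else merged ++ [seg]
  | none => merged ++ [seg]   -- unreachable: merged starts nonempty

def merge_skyline (skyline : List (Int × Int × Int)) : List (Int × Int × Int) :=
  match skyline with
  | [] => []
  | s :: rest => rest.foldl mergeStepA [s]

-- ===== PORT B =====
-- pass 1 step: assign each segment a group id, incrementing when it does not continue its predecessor
def assignStep (st : List ((Int × Int × Int) × Int) × Int × Option (Int × Int × Int))
    (seg : Int × Int × Int) : List ((Int × Int × Int) × Int) × Int × Option (Int × Int × Int) :=
  let gid : Int :=
    match st.2.2 with
    | none => st.2.1 + 1
    | some prev => if seg.2.1 ≠ prev.2.1 ∨ seg.1 ≠ prev.1 + prev.2.2 then st.2.1 + 1 else st.2.1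
  (st.1 ++ [(seg, gid)], gid, some seg)

-- pass 2 step: append a fresh group, or add the width into the group's slot out[g]
def collapseStep (out : List (Int × Int × Int)) (p : (Int × Int × Int) × Int) : List (Int × Int × Int) :=
  if (out.length : Int) = p.2 then out ++ [p.1]
  else
    match PySem.List.pyGet? out p.2 with
    | some cur => out.set p.2.toNat (cur.1, cur.2.1, cur.2.2 + p.1.2.2)
    | none => out   -- unreachable

def merge_skyline_alt (skyline : List (Int × Int × Int)) : List (Int × Int × Int) :=
  ((skyline.foldl assignStep ([], -1, none)).1).foldl collapseStep []

-- ===== PRECONDITION & SPEC =====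
def Spec_merge_skyline (skyline : List (Int × Int × Int)) (out : List (Int × Int × Int)) : Prop := out = merge_skyline_alt skyline
instance (skyline : List (Int × Int × Int)) (out : List (Int × Int × Int)) : Decidable (Spec_merge_skyline skyline out) := by unfold Spec_merge_skyline; infer_instance

-- ===== CLAIM (what is proved, stated in full; the proofs are below) =====
def Claim_equal_merge_skyline : Prop := ∀ (skyline : List (Int × Int × Int)), Dom_merge_skyline skyline → Spec_merge_skyline skyline (merge_skyline skyline)

-- ===== LEMMAS AND PROOFS =====

-- reference recursion: keeps the accumulated current segment, compares against it (A's view)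
def refR : (Int × Int × Int) → List (Int × Int × Int) → List (Int × Int × Int)
  | cur, [] => [cur]
  | cur, s :: rest =>
      if cur.2.1 = s.2.1 ∧ cur.1 + cur.2.2 = s.1 then
        refR (cur.1, cur.2.1, cur.2.2 + s.2.2) rest
      else cur :: refR s rest

-- reference recursion: compares against the previous ORIGINAL segment (B's view)
def refR' : (Int × Int × Int) → (Int × Int × Int) → List (Int × Int × Int) → List (Int × Int × Int)
  | cur, _, [] => [cur]
  | cur, prev, s :: rest =>
      if s.2.1 ≠ prev.2.1 ∨ s.1 ≠ prev.1 + prev.2.2 then cur :: refR' s s rest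
      else refR' (cur.1, cur.2.1, cur.2.2 + s.2.2) s rest

theorem foldA_eq_refR (rest : List (Int × Int × Int)) (acc : List (Int × Int × Int))
    (cur : Int × Int × Int) :
    rest.foldl mergeStepA (acc ++ [cur]) = acc ++ refR cur rest := by
  induction rest generalizing acc cur with
  | nil => simp [refR]
  | cons s rest ih =>
      simp only [List.foldl_cons, mergeStepA, List.getLast?_concat, List.dropLast_concat, refR]
      split_ifs with h
      · exact ih acc _
      · have := ih (acc ++ [cur]) s
        simpa using this

-- pairsFrom prev g l = the (segment, group id) pairs pass 1 produces after state (g, prev)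
def pairsFrom : (Int × Int × Int) → Int → List (Int × Int × Int) → List ((Int × Int × Int) × Int)
  | _, _, [] => []
  | prev, g, s :: rest =>
      if s.2.1 ≠ prev.2.1 ∨ s.1 ≠ prev.1 + prev.2.2 then (s, g + 1) :: pairsFrom s (g + 1) rest
      else (s, g) :: pairsFrom s g rest

theorem foldAssign_eq_pairsFrom (l : List (Int × Int × Int))
    (accP : List ((Int × Int × Int) × Int)) (g : Int) (prev : Int × Int × Int) :
    (l.foldl assignStep (accP, g, some prev)).1 = accP ++ pairsFrom prev g l := by
  induction l generalizing accP g prev with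
  | nil => simp [pairsFrom]
  | cons s rest ih =>
      simp only [List.foldl_cons, assignStep, pairsFrom]
      split_ifs with h
      · simpa using ih (accP ++ [(s, g + 1)]) (g + 1) s
      · simpa using ih (accP ++ [(s, g)]) g s

theorem foldCollapse_eq_refR' (rest : List (Int × Int × Int)) (acc : List (Int × Int × Int))
    (cur prev : Int × Int × Int) :
    (pairsFrom prev (acc.length : Int) rest).foldl collapseStep (acc ++ [cur])
      = acc ++ refR' cur prev rest := by
  induction rest generalizing acc cur prev with
  | nil => simp [pairsFrom, refR']
  | cons s rest ih =>
      simp only [pairsFrom]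
      split_ifs with h
      · -- new group: id = acc.length + 1 = (acc ++ [cur]).length, so append
        simp only [List.foldl_cons, collapseStep, refR', if_pos h]
        rw [if_pos (by push_cast [List.length_append]; simp)]
        have := ih (acc ++ [cur]) s s
        simpa using this
      · -- same group: id = acc.length, the slot of cur; add the width there
        simp only [List.foldl_cons, collapseStep, refR', if_neg h]
        rw [if_neg (by simp only [List.length_append, List.length_cons, List.length_nil]; push_cast; omega)]
        rw [show PySem.List.pyGet? (acc ++ [cur]) (acc.length : Int) = some cur from
              PySem.List.pyGet?_append_length (pre := acc) (y := cur) (ys := [])]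
        rw [show ((acc.length : Int)).toNat = acc.length by simp]
        show List.foldl collapseStep
            ((acc ++ [cur]).set acc.length (cur.1, cur.2.1, cur.2.2 + s.2.2))
            (pairsFrom s (acc.length : Int) rest) = _
        rw [show (acc ++ [cur]).set acc.length (cur.1, cur.2.1, cur.2.2 + s.2.2)
              = acc ++ [(cur.1, cur.2.1, cur.2.2 + s.2.2)] by
              simp]
        exact ih acc _ s

theorem refR_eq_refR' (rest : List (Int × Int × Int)) (cur prev : Int × Int × Int)
    (hh : cur.2.1 = prev.2.1) (hx : cur.1 + cur.2.2 = prev.1 + prev.2.2) :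
    refR cur rest = refR' cur prev rest := by
  induction rest generalizing cur prev with
  | nil => simp [refR, refR']
  | cons s rest ih =>
      simp only [refR, refR']
      by_cases h : cur.2.1 = s.2.1 ∧ cur.1 + cur.2.2 = s.1
      · obtain ⟨h1, h2⟩ := h
        rw [if_pos ⟨h1, h2⟩, if_neg (by omega)]
        refine ih (cur.1, cur.2.1, cur.2.2 + s.2.2) s ?_ ?_
        · show cur.2.1 = s.2.1; exact h1
        · show cur.1 + (cur.2.2 + s.2.2) = s.1 + s.2.2; omega
      · rw [if_neg h, if_pos (by by_contra hc; push Not at hc; exact h ⟨by omega, by omega⟩)]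
        rw [ih s s rfl rfl]

-- ===== VERDICT (by name: the statement is the Claim_ definition above) =====
theorem merge_skyline_spec : Claim_equal_merge_skyline := by
  intro skyline _
  cases skyline with
  | nil => rfl
  | cons s rest =>
      show merge_skyline (s :: rest) = merge_skyline_alt (s :: rest)
      simp only [merge_skyline, merge_skyline_alt]
      have hA := foldA_eq_refR rest [] s
      simp only [List.nil_append] at hA
      rw [hA]
      have h1 : ((s :: rest).foldl assignStep ([], -1, none)).1
          = [(s, 0)] ++ pairsFrom s 0 rest := by
        simp only [List.foldl_cons]
        have : assignStep ([], -1, none) s = ([(s, (0:Int))], (0:Int), some s) := by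
          simp [assignStep]
        rw [this]
        exact foldAssign_eq_pairsFrom rest [(s, 0)] 0 s
      rw [h1]
      have h2 : collapseStep [] (s, 0) = [] ++ [s] := by simp [collapseStep]
      simp only [List.cons_append, List.nil_append, List.foldl_cons, h2]
      have h3 := foldCollapse_eq_refR' rest [] s s
      simp only [List.length_nil, Nat.cast_zero, List.nil_append] at h3
      rw [h3]
      exact refR_eq_refR' rest s s rfl rfl
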